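-- pv_equiv track=rewrite | github.com/bigfrog10/python-data-structure-algo-tutorial | src/companies/hudson_river_trading/spike/spike.py | spike
-- ===== SOURCE A (Python) =====
-- from collections import Counter
--
-- def spike(nums: list) -> int:
--     if not nums:
--         return 0
--
--     # we could run these in one loop, O(n)
--     max_v = max(nums)
--     counts = Counter(nums)
--
--     ret = 1  # single peak
--     for num, count in counts.items():  # O(n)
--         if num != max_v:  # for every off peak value
--             ret += min(2, count)  # either 2 sides of peak or 1 side if there is only 1.
--
--     return ret
-- ===== SOURCE B (Python) =====
-- def spike(nums: list) -> int:
--     if not nums: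
--         return 0
--     seen = set()
--     dups = set()
--     for x in nums:
--         if x in seen:
--             dups.add(x)
--         else:
--             seen.add(x)
--     dups.discard(max(seen))
--     return len(seen) + len(dups)
-- ===== Notes on version B (the rewrite author's own statement) =====
-- stated objective: alternative
-- what changed: Instead of building a Counter and summing min(2,count) per distinct value, B makes one pass maintaining two sets (values seen, values seen at least twice) and returns the arithmetic identity len(seen) + len(dups - {max}), using min(2,c) = 1 + [c>=2] for c>=1; no Counter, no per-value capped sum.
import Mathlib
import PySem

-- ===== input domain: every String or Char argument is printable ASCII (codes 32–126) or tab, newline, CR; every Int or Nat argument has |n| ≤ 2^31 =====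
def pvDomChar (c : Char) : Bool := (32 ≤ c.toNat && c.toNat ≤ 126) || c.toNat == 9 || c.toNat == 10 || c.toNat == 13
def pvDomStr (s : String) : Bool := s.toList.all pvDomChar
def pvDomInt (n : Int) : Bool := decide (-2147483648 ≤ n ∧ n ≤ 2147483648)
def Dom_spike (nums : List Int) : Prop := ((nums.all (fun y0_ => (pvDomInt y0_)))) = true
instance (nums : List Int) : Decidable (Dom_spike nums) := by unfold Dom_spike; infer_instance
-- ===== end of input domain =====

-- B drops the Counter/capped-sum entirely: one pass builds 'seen' and 'dups' sets, answer = len(seen) + len(dups - {max}); return value only.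

-- ===== PORT A =====
def spike (nums : List Int) : Int :=
  if nums = [] then 0
  else
    match PySem.List.max? nums (fun x => x) with
    | none => 0   -- unreachable: nums ≠ []
    | some maxV =>
      let counts := PySem.Dict.counter nums
      counts.items.foldl (fun ret p => if p.1 ≠ maxV then ret + min 2 p.2 else ret) 1

-- ===== PORT B =====
def spike_alt (nums : List Int) : Int :=
  if nums = [] then 0
  else
    let st := nums.foldl
      (fun (st : PySem.Set Int × PySem.Set Int) x =>
        if PySem.Set.contains st.1 x then (st.1, PySem.Set.add st.2 x)
        else (PySem.Set.add st.1 x, st.2))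
      (PySem.Set.empty, PySem.Set.empty)
    match PySem.List.max? st.1 (fun x => x) with
    | none => 0   -- unreachable: seen is nonempty
    | some top =>
      (PySem.Set.len st.1 : Int) + (PySem.Set.len (PySem.Set.discard st.2 top) : Int)

-- ===== PRECONDITION & SPEC =====
def Spec_spike (nums : List Int) (out : Int) : Prop := out = spike_alt nums
instance (nums : List Int) (out : Int) : Decidable (Spec_spike nums out) := by unfold Spec_spike; infer_instance

-- ===== CLAIM (what is proved, stated in full; the proofs are below) =====
def Claim_equal_spike : Prop := ∀ (nums : List Int), Dom_spike nums → Spec_spike nums (spike nums)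

-- ===== LEMMAS AND PROOFS =====

-- A's loop is "1 + Σ min(2, cnt) over pairs with key ≠ m"
lemma foldl_spike (m : Int) : ∀ (l : List (Int × Int)) (a : Int),
    l.foldl (fun r p => if p.1 ≠ m then r + min 2 p.2 else r) a
      = a + ((l.filter (fun p => decide (p.1 ≠ m))).map (fun p => min 2 p.2)).sum := by
  intro l
  induction l with
  | nil => intro a; simp
  | cons p t ih =>
    intro a
    rw [List.foldl_cons, ih]
    by_cases h : p.1 = m
    · simp [h]
    · simp [h, add_assoc]

-- first component of B's pass: every element gets Set.add'ed
lemma fold_fst : ∀ (l : List Int) (s d : PySem.Set Int),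
    (l.foldl
      (fun (st : PySem.Set Int × PySem.Set Int) x =>
        if PySem.Set.contains st.1 x then (st.1, PySem.Set.add st.2 x)
        else (PySem.Set.add st.1 x, st.2)) (s, d)).1
      = l.foldl PySem.Set.add s := by
  intro l
  induction l with
  | nil => intro s d; rfl
  | cons x t ih =>
    intro s d
    rw [List.foldl_cons, List.foldl_cons]
    by_cases h : PySem.Set.contains s x = true
    · have hm : x ∈ s := (PySem.Set.contains_iff s x).mp h
      rw [if_pos h, ih, PySem.Set.add_of_mem hm]
    · rw [if_neg h, ih]

-- second component: membership characterisation
lemma fold_snd_mem : ∀ (l : List Int) (s d : PySem.Set Int) (v : Int),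
    (v ∈ (l.foldl
      (fun (st : PySem.Set Int × PySem.Set Int) x =>
        if PySem.Set.contains st.1 x then (st.1, PySem.Set.add st.2 x)
        else (PySem.Set.add st.1 x, st.2)) (s, d)).2)
      ↔ (v ∈ d ∨ (v ∈ l ∧ v ∈ s) ∨ 2 ≤ l.count v) := by
  intro l
  induction l with
  | nil => intro s d v; simp
  | cons x t ih =>
    intro s d v
    rw [List.foldl_cons]
    by_cases h : PySem.Set.contains s x = true
    · have hm : x ∈ s := (PySem.Set.contains_iff s x).mp h
      rw [if_pos h, ih]
      simp only [PySem.Set.mem_add, List.mem_cons]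
      by_cases hv : v = x
      · subst hv
        exact ⟨fun _ => Or.inr (Or.inl ⟨Or.inl rfl, hm⟩), fun _ => Or.inl (Or.inr rfl)⟩
      · have hvx : x ≠ v := fun hh => hv hh.symm
        have hcc : List.count v (x :: t) = List.count v t := by
          simp [hvx]
        rw [hcc]
        tauto
    · have hns : x ∉ s := fun hm => h ((PySem.Set.contains_iff s x).mpr hm)
      rw [if_neg h, ih]
      simp only [PySem.Set.mem_add, List.mem_cons]
      by_cases hv : v = x
      · subst hv
        rw [List.count_cons_self]
        have hmem : v ∈ t ↔ 1 ≤ List.count v t := List.one_le_count_iff.symm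
        constructor
        · rintro (hd | (⟨ht, _⟩ | hc))
          · exact Or.inl hd
          · have := hmem.mp ht; exact Or.inr (Or.inr (by omega))
          · exact Or.inr (Or.inr (by omega))
        · rintro (hd | (⟨_, hs⟩ | hc))
          · exact Or.inl hd
          · exact absurd hs hns
          · have h1 : 1 ≤ List.count v t := by omega
            exact Or.inr (Or.inl ⟨hmem.mpr h1, Or.inr rfl⟩)
      · have hvx : x ≠ v := fun hh => hv hh.symm
        have hcc : List.count v (x :: t) = List.count v t := by
          simp [hvx]
        rw [hcc]
        tauto

-- second component stays duplicate-free
lemma fold_snd_nodup : ∀ (l : List Int) (s d : PySem.Set Int), d.Nodup →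
    (l.foldl
      (fun (st : PySem.Set Int × PySem.Set Int) x =>
        if PySem.Set.contains st.1 x then (st.1, PySem.Set.add st.2 x)
        else (PySem.Set.add st.1 x, st.2)) (s, d)).2.Nodup := by
  intro l
  induction l with
  | nil => intro s d hd; exact hd
  | cons x t ih =>
    intro s d hd
    rw [List.foldl_cons]
    by_cases h : PySem.Set.contains s x = true
    · rw [if_pos h]
      exact ih _ _ (PySem.Set.nodup_add _ _ hd)
    · rw [if_neg h]
      exact ih _ _ hd

-- 1 + [c ≥ 2] for values that occur at least once
lemma sum_min2 (nums : List Int) : ∀ (K : List Int), (∀ v ∈ K, v ∈ nums) →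
    (K.map (fun v => min 2 ((nums.count v : Int)))).sum
      = (K.length : Int) + ((K.filter (fun v => decide (2 ≤ nums.count v))).length : Int) := by
  intro K
  induction K with
  | nil => intro _; simp
  | cons x t ih =>
    intro h
    have hx : x ∈ nums := h x (List.mem_cons_self ..)
    have h1 : 1 ≤ nums.count x := List.one_le_count_iff.mpr hx
    rw [List.map_cons, List.sum_cons, ih (fun v hv => h v (List.mem_cons_of_mem _ hv))]
    by_cases h2 : 2 ≤ nums.count x
    · have : min 2 ((nums.count x : Int)) = 2 := by
        have : (2 : Int) ≤ (nums.count x : Int) := by exact_mod_cast h2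
        omega
      rw [this, List.filter_cons_of_pos (by simpa using h2)]
      simp only [List.length_cons]; push_cast; ring
    · have hc1 : nums.count x = 1 := by omega
      have : min 2 ((nums.count x : Int)) = 1 := by rw [hc1]; decide
      rw [this, List.filter_cons_of_neg (by simpa using h2)]
      simp only [List.length_cons]; push_cast; ring

-- in a duplicate-free list containing m, exactly one element fails 'v ≠ m'
lemma filter_len_one (m : Int) : ∀ (L : List Int), L.Nodup → m ∈ L →
    (L.filter (fun v => !decide (v ≠ m))).length = 1 := by
  intro L
  induction L with
  | nil => intro _ h; simp at h
  | cons x t ih =>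
    intro hnd hm
    rcases List.mem_cons.mp hm with rfl | hmt
    · rw [List.filter_cons_of_pos (by simp)]
      have hnt : m ∉ t := (List.nodup_cons.mp hnd).1
      have : t.filter (fun v => !decide (v ≠ m)) = [] := by
        rw [List.filter_eq_nil_iff]
        intro a ha
        simp only [Bool.not_eq_true', decide_eq_false_iff_not, Decidable.not_not]
        intro h0
        exact hnt (h0 ▸ ha)
      rw [this]
      rfl
    · have hx : x ≠ m := fun h0 => (List.nodup_cons.mp hnd).1 (h0 ▸ hmt)
      rw [List.filter_cons_of_neg (by simp [hx])]
      exact ih (List.nodup_cons.mp hnd).2 hmt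

-- ===== VERDICT (by name: the statement is the Claim_ definition above) =====
theorem spike_spec : Claim_equal_spike := by
  unfold Claim_equal_spike
  intro nums _
  unfold Spec_spike
  by_cases hn : nums = []
  · simp [spike, spike_alt, hn]
  · have hL1 : (nums.foldl
        (fun (st : PySem.Set Int × PySem.Set Int) x =>
          if PySem.Set.contains st.1 x then (st.1, PySem.Set.add st.2 x)
          else (PySem.Set.add st.1 x, st.2)) (PySem.Set.empty, PySem.Set.empty)).1
        = PySem.Set.ofList nums := by
      rw [fold_fst, PySem.Set.ofList_eq_foldl]; rfl
    set L := PySem.Set.ofList nums with hLdef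
    have hLmem : ∀ v, v ∈ L ↔ v ∈ nums := fun v => PySem.Set.mem_ofList nums v
    have hLnd : L.Nodup := PySem.Set.nodup_ofList nums
    have hLne : L ≠ [] := by
      intro h0
      rcases List.exists_mem_of_ne_nil nums hn with ⟨y, hy⟩
      exact absurd ((hLmem y).mpr hy) (by rw [h0]; simp)
    cases hM : PySem.List.max? nums (fun x => x) with
    | none => exact absurd ((PySem.List.max?_eq_none_iff nums (fun x => x)).mp hM) hn
    | some m =>
      have hmnums : m ∈ nums := PySem.List.max?_mem hM
      have hmmax : ∀ y ∈ nums, y ≤ m := PySem.List.max?_isMax hM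
      cases hM2 : PySem.List.max? L (fun x => x) with
      | none =>
        exact absurd ((PySem.List.max?_eq_none_iff L (fun x => x)).mp hM2) hLne
      | some m2 =>
        have hm2 : m2 = m := le_antisymm
          (hmmax m2 ((hLmem m2).mp (PySem.List.max?_mem hM2)))
          (PySem.List.max?_isMax hM2 m ((hLmem m).mpr hmnums))
        -- A's value
        simp only [spike, spike_alt, if_neg hn, hM, hL1, hM2, hm2]
        rw [PySem.Dict.items_counter, foldl_spike, List.filter_map, List.map_map]
        rw [show ((fun p : Int × Int => decide (p.1 ≠ m)) ∘ fun k => (k, (nums.count k : Int)))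
              = fun v => decide (v ≠ m) from rfl]
        rw [show ((fun p : Int × Int => min 2 p.2) ∘ fun k => (k, (nums.count k : Int)))
              = fun v => min 2 ((nums.count v : Int)) from rfl]
        set K := L.filter (fun v => decide (v ≠ m)) with hKdef
        have hKsub : ∀ v ∈ K, v ∈ nums := by
          intro v hv
          exact (hLmem v).mp (List.mem_of_mem_filter hv)
        rw [sum_min2 nums K hKsub]
        -- |K| = |L| - 1  (m occurs exactly once in L)
        have hcnt1 : L.count m = 1 := List.count_eq_one_of_mem hLnd ((hLmem m).mpr hmnums)
        have hKlen : K.length + 1 = L.length := by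
          have hsplit := List.length_eq_length_filter_add (l := L) (fun v => decide (v ≠ m))
          have h1 := filter_len_one m L hLnd ((hLmem m).mpr hmnums)
          rw [← hKdef] at hsplit
          omega
        -- the two "duplicated non-max values" lists have the same length
        have hG : (PySem.Set.discard (nums.foldl
              (fun (st : PySem.Set Int × PySem.Set Int) x =>
                if PySem.Set.contains st.1 x then (st.1, PySem.Set.add st.2 x)
                else (PySem.Set.add st.1 x, st.2)) (PySem.Set.empty, PySem.Set.empty)).2 m).length
            = (K.filter (fun v => decide (2 ≤ nums.count v))).length := by
      -- both sides are Nodup lists with membership 'count ≥ 2 ∧ v ≠ m'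
          apply List.Perm.length_eq
          have hKnd : K.Nodup := hLnd.filter _
          rw [List.perm_ext_iff_of_nodup
            (PySem.Set.nodup_discard _ m
              (fold_snd_nodup nums PySem.Set.empty PySem.Set.empty List.nodup_nil))
            (hKnd.filter _)]
          intro v
          rw [PySem.Set.mem_discard, fold_snd_mem]
          have himp : 2 ≤ nums.count v → v ∈ nums := fun h =>
            List.one_le_count_iff.mp (by omega)
          simp only [List.mem_filter, hKdef, decide_eq_true_eq, PySem.Set.empty,
            List.not_mem_nil, hLmem]
          tauto
        have hlen : ∀ (l : List Int), PySem.Set.len l = (l.length : Int) := fun l => rfl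
        rw [hlen, hlen, hG]
        omega
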